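-- pv_equiv track=rewrite | github.com/112224/algorithm | python3/15684 사다리 조작(2).py | check
-- ===== SOURCE A (Python) =====
-- def rollback(board, combi):
--     for x, y in combi:
--         board[x][y] = 0
--         board[x][y + 1] = 0
--
-- def check(board, combi):
--     ret = True
--     for x, y in combi:
--         if board[x][y] != 0:
--             ret = False
--             break
--         board[x][y] = 1
--         board[x][y + 1] = 2
--     if not ret:
--         rollback(board, combi)
--     return ret
-- ===== SOURCE B (Python) =====
-- def check(board, combi):
--     # validate first: a rung at (x, y) conflicts if its cell is already nonzero
--     # on the board or either endpoint of another rung in combi covers it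
--     occupied = set()
--     ok = True
--     for x, y in combi:
--         if board[x][y] != 0 or (x, y) in occupied:
--             ok = False
--         occupied.add((x, y))
--         occupied.add((x, y + 1))
--     if ok:
--         for x, y in combi:
--             board[x][y] = 1
--             board[x][y + 1] = 2
--     return ok
-- ===== Notes on version B (the rewrite author's own statement) =====
-- stated objective: alternative
-- what changed: B separates validation from mutation: one read-only pass over combi checks each rung against the ORIGINAL board plus a set of cells occupied by the other rungs, then a single write pass places every rung only if all are valid, instead of A's place-on-the-board-then-rollback with reads of the partially mutated board; …
-- outside the precondition, e.g. on check([[0, 0, 0]], [(0, 1), (0, -2)]): A returns False, B returns True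
import Mathlib
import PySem

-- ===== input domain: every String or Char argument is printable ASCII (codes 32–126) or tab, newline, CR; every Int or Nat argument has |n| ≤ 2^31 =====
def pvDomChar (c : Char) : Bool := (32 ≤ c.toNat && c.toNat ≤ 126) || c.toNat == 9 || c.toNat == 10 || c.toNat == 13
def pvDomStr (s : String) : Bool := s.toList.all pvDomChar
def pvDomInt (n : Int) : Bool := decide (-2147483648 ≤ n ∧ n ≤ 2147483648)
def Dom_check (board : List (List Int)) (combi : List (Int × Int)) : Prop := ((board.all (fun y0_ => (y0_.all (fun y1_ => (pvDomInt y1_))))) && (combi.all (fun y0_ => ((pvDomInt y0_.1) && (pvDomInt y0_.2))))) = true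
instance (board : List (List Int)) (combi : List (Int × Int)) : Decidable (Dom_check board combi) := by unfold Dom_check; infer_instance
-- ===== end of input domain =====

-- B splits validation from mutation (a read-only conflict pass over a set of occupied
-- cells, then a write pass only on success) instead of A's place-then-rollback; the
-- theorems are about the RETURN value only (on failure A's rollback zeroes the combi
-- cells while B leaves the board untouched; the ports omit the writes, which the
-- returned Bool never reads).

-- ===== PORT A =====
-- A's loop: place rungs one by one on the (mutated) board, break on conflict.
-- rollback(board, combi) only mutates `board`; the returned Bool never reads it,
-- so the ports carry no board output and the rollback call is not modelled.
def checkGo (board : List (List Int)) (combi : List (Int × Int)) : Bool :=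
  match combi with
  | [] => true
  | (x, y) :: rest =>
    let row := PySem.List.pyGetD board x []
    if PySem.List.pyGetD row y 0 ≠ 0 then false
    else checkGo
      (PySem.List.pySetD board x
        (PySem.List.pySetD (PySem.List.pySetD row y 1) (y + 1) 2)) rest

def check (board : List (List Int)) (combi : List (Int × Int)) : Bool :=
  checkGo board combi

-- ===== PORT B =====
-- B's validation pass: read the ORIGINAL board, track cells of all rungs in a set,
-- keep an ok flag over the whole scan.
def checkAltGo (board : List (List Int)) (combi : List (Int × Int))
    (occupied : PySem.Set (Int × Int)) (ok : Bool) : Bool :=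
  match combi with
  | [] => ok
  | (x, y) :: rest =>
    checkAltGo board rest
      (PySem.Set.add (PySem.Set.add occupied (x, y)) (x, y + 1))
      (if PySem.List.pyGetD (PySem.List.pyGetD board x []) y 0 ≠ 0
          ∨ PySem.Set.contains occupied (x, y) then false else ok)

-- B's success write pass only mutates `board`.
def check_alt (board : List (List Int)) (combi : List (Int × Int)) : Bool :=
  checkAltGo board combi PySem.Set.empty true

-- ===== PRECONDITION & SPEC =====
-- the two physical board cells a rung (x, y) occupies, with Python index semantics
def cellL (board : List (List Int)) (p : Int × Int) : Int × Int :=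
  (PySem.Int.mod p.1 board.length,
   PySem.Int.mod p.2 (PySem.List.pyGetD board p.1 []).length)
def cellR (board : List (List Int)) (p : Int × Int) : Int × Int :=
  (PySem.Int.mod p.1 board.length,
   PySem.Int.mod (p.2 + 1) (PySem.List.pyGetD board p.1 []).length)

-- Pre_ excludes out-of-range indices (A raises IndexError there) and combi of two or
-- more rungs with a negative coordinate whose physical cells collide: there A's overlap
-- detection works on Python's wrapped-around cells while B's works on the literal
-- coordinates, a corner where either reading is defensible.
def Pre_check (board : List (List Int)) (combi : List (Int × Int)) : Prop :=
  (∀ p ∈ combi, PySem.Raise.InRange board.length p.1 ∧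
     PySem.Raise.InRange (PySem.List.pyGetD board p.1 []).length p.2 ∧
     PySem.Raise.InRange (PySem.List.pyGetD board p.1 []).length (p.2 + 1)) ∧
  (combi.length ≤ 1 ∨ (∀ p ∈ combi, 0 ≤ p.1 ∧ 0 ≤ p.2) ∨
    List.Pairwise (fun p q => cellL board q ≠ cellL board p ∧ cellL board q ≠ cellR board p) combi)
instance (board : List (List Int)) (combi : List (Int × Int)) : Decidable (Pre_check board combi) := by unfold Pre_check; infer_instance

def pvWitness_check : List (List Int) × (List (Int × Int)) :=
  ([[0, 0], [0, 0]], [(0, 0), (1, 0)])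

def Spec_check (board : List (List Int)) (combi : List (Int × Int)) (out : Bool) : Prop := out = check_alt board combi
instance (board : List (List Int)) (combi : List (Int × Int)) (out : Bool) : Decidable (Spec_check board combi out) := by unfold Spec_check; infer_instance

-- ===== CLAIM (what is proved, stated in full; the proofs are below) =====
def Claim_equal_check : Prop := ∀ (board : List (List Int)) (combi : List (Int × Int)), Dom_check board combi → Pre_check board combi → Spec_check board combi (check board combi)

-- ===== LEMMAS AND PROOFS =====

-- a nonnegative in-range Python index i names position i.toNat
lemma pyIdx_nonneg (n : Nat) (i : Int) (h0 : 0 ≤ i) (h1 : i < n) :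
    PySem.List.pyIdx? n i = some i.toNat := by
  unfold PySem.List.pyIdx?
  rw [if_pos h0, if_pos h1]

lemma pyGetD_nonneg {α : Type} (xs : List α) (i : Int) (d : α)
    (h0 : 0 ≤ i) (h1 : i < xs.length) :
    PySem.List.pyGetD xs i d = xs.getD i.toNat d := by
  simp [PySem.List.pyGetD, PySem.List.pyGet?, pyIdx_nonneg _ _ h0 h1,
    List.getD_eq_getElem?_getD]

lemma pySetD_nonneg {α : Type} (xs : List α) (i : Int) (v : α)
    (h0 : 0 ≤ i) (h1 : i < xs.length) :
    PySem.List.pySetD xs i v = xs.set i.toNat v := by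
  simp [PySem.List.pySetD, PySem.List.pySet?, pyIdx_nonneg _ _ h0 h1]

-- a possibly negative in-range Python index i names position (i % len).toNat
lemma pyIdx_inRange (n : Nat) (i : Int) (h : PySem.Raise.InRange n i) :
    PySem.List.pyIdx? n i = some (i % (n : Int)).toNat := by
  obtain ⟨h1, h2⟩ := h
  unfold PySem.List.pyIdx?
  by_cases h0 : 0 ≤ i
  · rw [if_pos h0, if_pos h2, Int.emod_eq_of_lt h0 h2]
  · rw [if_neg h0, if_pos h1]
    have hn : i % (n : Int) = i + n := by
      have hm := Int.add_mul_emod_self_left (a := i) (b := (n : Int)) (c := 1)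
      rw [mul_one] at hm
      rw [← hm, Int.emod_eq_of_lt (by omega) (by omega)]
    have h2 : (i % (n : Int)).toNat = n - (-i).toNat := by rw [hn]; omega
    rw [h2]

lemma pyGetD_inRange {α : Type} (xs : List α) (i : Int) (d : α)
    (h : PySem.Raise.InRange xs.length i) :
    PySem.List.pyGetD xs i d = xs.getD (i % (xs.length : Int)).toNat d := by
  simp [PySem.List.pyGetD, PySem.List.pyGet?, pyIdx_inRange _ _ h,
    List.getD_eq_getElem?_getD]

lemma pySetD_inRange {α : Type} (xs : List α) (i : Int) (v : α)
    (h : PySem.Raise.InRange xs.length i) :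
    PySem.List.pySetD xs i v = xs.set (i % (xs.length : Int)).toNat v := by
  simp [PySem.List.pySetD, PySem.List.pySet?, pyIdx_inRange _ _ h]

lemma canon_lt (n : Nat) (i : Int) (h : PySem.Raise.InRange n i) :
    (i % (n : Int)).toNat < n := by
  obtain ⟨h1, h2⟩ := h
  have h0 : (0 : Int) < n := by omega
  have hl : i % (n : Int) < (n : Int) := Int.emod_lt_of_pos i h0
  have hg : (0 : Int) ≤ i % (n : Int) := Int.emod_nonneg i (by omega)
  omega

lemma canon_cast (n : Nat) (i : Int) (h : 0 < n) :
    (((i % (n : Int)).toNat : Int)) = i % (n : Int) := by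
  have hn : (n : Int) ≠ 0 := by exact_mod_cast h.ne'
  exact Int.toNat_of_nonneg (Int.emod_nonneg i hn)

lemma pyIdx_lt (n : Nat) (i : Int) (k : Nat) (h : PySem.List.pyIdx? n i = some k) :
    k < n := by
  unfold PySem.List.pyIdx? at h
  split_ifs at h <;> simp_all <;> omega

-- the cell value A's loop reads in a board state b, in canonical coordinates
def rdN (b : List (List Int)) (i j : Nat) : Int := (b.getD i []).getD j 0

lemma rdN_upd (b : List (List Int)) (i j j2 : Nat) (hi : i < b.length)
    (hj : j < (b.getD i []).length) (hj2 : j2 < (b.getD i []).length) (i' j' : Nat) :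
    rdN (b.set i (((b.getD i []).set j 1).set j2 2)) i' j' =
      if i' = i ∧ j' = j2 then 2
      else if i' = i ∧ j' = j then 1
      else rdN b i' j' := by
  have hbset : (b.set i (((b.getD i []).set j 1).set j2 2)).getD i' ([] : List Int)
      = if i' = i then ((b.getD i []).set j 1).set j2 2 else b.getD i' [] := by
    by_cases hii : i' = i
    · rw [hii, if_pos rfl, List.getD_eq_getElem?_getD, List.getElem?_set_self hi,
        Option.getD_some]
    · rw [if_neg hii, List.getD_eq_getElem?_getD,
        List.getElem?_set_ne (fun e => hii e.symm), ← List.getD_eq_getElem?_getD]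
  unfold rdN
  rw [hbset]
  by_cases hii : i' = i
  · rw [if_pos hii]
    by_cases h2 : j' = j2
    · rw [h2, List.getD_eq_getElem?_getD,
        List.getElem?_set_self (by simpa using hj2), Option.getD_some]
      simp [hii]
    · by_cases h3 : j' = j
      · have hne : j ≠ j2 := fun e => h2 (h3.trans e)
        rw [h3, List.getD_eq_getElem?_getD, List.getElem?_set_ne (fun e => hne e.symm),
          List.getElem?_set_self hj, Option.getD_some]
        simp [hii, hne]
      · rw [List.getD_eq_getElem?_getD, List.getElem?_set_ne (fun e => h2 e.symm),
          List.getElem?_set_ne (fun e => h3 e.symm), ← List.getD_eq_getElem?_getD]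
        simp [h2, h3, hii]
  · rw [if_neg hii]
    simp [hii]

-- replacing one row by a row of the same length leaves every pyGetD row length unchanged
lemma rowlen_set (b : List (List Int)) (i : Nat) (r : List Int)
    (hr : r.length = (b.getD i []).length) (x : Int) :
    (PySem.List.pyGetD (b.set i r) x ([] : List Int)).length
      = (PySem.List.pyGetD b x ([] : List Int)).length := by
  simp only [PySem.List.pyGetD, PySem.List.pyGet?, List.length_set]
  cases hk : PySem.List.pyIdx? b.length x with
  | none => rfl
  | some k =>
    have hkl : k < b.length := pyIdx_lt _ _ _ hk
    simp only [Option.bind_some]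
    by_cases hki : k = i
    · rw [hki, List.getElem?_set_self (by omega)]
      have : b[i]? = some (b.getD i []) := by
        rw [List.getD_eq_getElem?_getD]
        cases hb : b[i]? with
        | none => exact absurd (List.getElem?_eq_none_iff.mp hb) (by omega)
        | some v => rfl
      rw [this]
      simpa using hr
    · rw [List.getElem?_set_ne (fun e => hki e.symm)]

-- invariant tying A's mutated board b to the original board and B's occupied set
def BInv (b : List (List Int)) (occ : PySem.Set (Int × Int)) (orig : List (List Int)) : Prop :=
  b.length = orig.length ∧
  (∀ x : Int, (PySem.List.pyGetD b x ([] : List Int)).length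
      = (PySem.List.pyGetD orig x ([] : List Int)).length) ∧
  (∀ i j : Nat,
    (((i : Int), (j : Int)) ∈ occ → rdN b i j ≠ 0) ∧
    (((i : Int), (j : Int)) ∉ occ → rdN b i j = rdN orig i j))

lemma altGo_false (board : List (List Int)) :
    ∀ (combi : List (Int × Int)) (occ : PySem.Set (Int × Int)),
      checkAltGo board combi occ false = false := by
  intro combi
  induction combi with
  | nil => intro occ; rfl
  | cons p rest ih =>
    intro occ
    obtain ⟨x, y⟩ := p
    simp only [checkAltGo]
    split_ifs <;> exact ih _

-- a single rung: both programs just test its cell on the (same) board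
lemma single_eq (board : List (List Int)) (p : Int × Int) :
    checkGo board [p] = checkAltGo board [p] PySem.Set.empty true := by
  obtain ⟨x, y⟩ := p
  simp only [checkGo, checkAltGo]
  by_cases h : PySem.List.pyGetD (PySem.List.pyGetD board x []) y 0 ≠ 0
  · rw [if_pos h, if_pos (Or.inl h)]
  · have hnc : ¬ (PySem.List.pyGetD (PySem.List.pyGetD board x []) y 0 ≠ 0
        ∨ PySem.Set.contains PySem.Set.empty (x, y)) := by
      rintro (hc | hc)
      · exact h hc
      · simp [PySem.Set.contains, PySem.Set.empty] at hc
    rw [if_neg h, if_neg hnc]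

lemma go_eq (orig : List (List Int)) (combi : List (Int × Int)) :
    ∀ (b : List (List Int)) (occ : PySem.Set (Int × Int)),
      (∀ p ∈ combi, 0 ≤ p.1 ∧ p.1 < (orig.length : Int) ∧ 0 ≤ p.2 ∧
        p.2 + 1 < ((PySem.List.pyGetD orig p.1 ([] : List Int)).length : Int)) →
      BInv b occ orig →
      checkGo b combi = checkAltGo orig combi occ true := by
  induction combi with
  | nil => intro b occ _ _; rfl
  | cons p rest ih =>
    obtain ⟨x, y⟩ := p
    intro b occ hpre hinv
    obtain ⟨hlen, hrowlen, hcell⟩ := hinv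
    obtain ⟨hx0', hx1', hy0', hy1'⟩ := hpre (x, y) List.mem_cons_self
    have hx0 : (0 : Int) ≤ x := hx0'
    have hx1 : x < (orig.length : Int) := hx1'
    have hy0 : (0 : Int) ≤ y := hy0'
    have hy1 : y + 1 < ((PySem.List.pyGetD orig x ([] : List Int)).length : Int) := hy1'
    have hprest : ∀ p ∈ rest, 0 ≤ p.1 ∧ p.1 < (orig.length : Int) ∧ 0 ≤ p.2 ∧
        p.2 + 1 < ((PySem.List.pyGetD orig p.1 ([] : List Int)).length : Int) :=
      fun q hq => hpre q (List.mem_cons_of_mem _ hq)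
    have hxcast : ((x.toNat : Nat) : Int) = x := Int.toNat_of_nonneg hx0
    have hycast : ((y.toNat : Nat) : Int) = y := Int.toNat_of_nonneg hy0
    have hy1cast : (((y + 1).toNat : Nat) : Int) = y + 1 := Int.toNat_of_nonneg (by omega)
    have hArow : PySem.List.pyGetD b x ([] : List Int) = b.getD x.toNat [] :=
      pyGetD_nonneg _ _ _ hx0 (by rw [hlen]; exact hx1)
    have hBrow : PySem.List.pyGetD orig x ([] : List Int) = orig.getD x.toNat [] :=
      pyGetD_nonneg _ _ _ hx0 hx1
    have hmB : (b.getD x.toNat ([] : List Int)).length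
        = (PySem.List.pyGetD orig x ([] : List Int)).length := by
      rw [← hArow]; exact hrowlen x
    have hAread : PySem.List.pyGetD (PySem.List.pyGetD b x ([] : List Int)) y 0
        = rdN b x.toNat y.toNat := by
      rw [hArow, pyGetD_nonneg _ _ _ hy0 (by rw [hmB]; omega)]
      rfl
    have hBread : PySem.List.pyGetD (PySem.List.pyGetD orig x ([] : List Int)) y 0
        = rdN orig x.toNat y.toNat := by
      rw [hBrow, pyGetD_nonneg _ _ _ hy0 (by rw [← congrArg List.length hBrow]; omega)]
      rfl
    have hci' : x.toNat < b.length := by rw [hlen]; omega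
    have hcj' : y.toNat < (b.getD x.toNat ([] : List Int)).length := by rw [hmB]; omega
    have hcj1' : (y + 1).toNat < (b.getD x.toNat ([] : List Int)).length := by
      rw [hmB]; omega
    simp only [checkGo, checkAltGo]
    rw [hAread, hBread]
    by_cases hmem : (x, y) ∈ occ
    · have hmem' : (((x.toNat : Nat) : Int), ((y.toNat : Nat) : Int)) ∈ occ := by
        rw [hxcast, hycast]; exact hmem
      have hA := (hcell _ _).1 hmem'
      rw [if_pos hA, if_pos (Or.inr (by simpa [PySem.Set.contains] using hmem))]
      exact (altGo_false _ _ _).symm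
    · have hmem' : (((x.toNat : Nat) : Int), ((y.toNat : Nat) : Int)) ∉ occ := by
        rw [hxcast, hycast]; exact hmem
      have heq := (hcell _ _).2 hmem'
      by_cases hz : rdN orig x.toNat y.toNat = 0
      · rw [if_neg (by simp [heq, hz]), if_neg (by
          rintro (hc | hc)
          · exact hc hz
          · exact hmem (by simpa [PySem.Set.contains] using hc))]
        have hupd : PySem.List.pySetD b x
            (PySem.List.pySetD (PySem.List.pySetD (PySem.List.pyGetD b x []) y 1) (y + 1) 2)
            = b.set x.toNat
              (((b.getD x.toNat []).set y.toNat 1).set (y + 1).toNat 2) := by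
          rw [hArow,
            pySetD_nonneg (b.getD x.toNat ([] : List Int)) y 1 hy0 (by rw [hmB]; omega),
            pySetD_nonneg ((b.getD x.toNat ([] : List Int)).set y.toNat 1) (y + 1) 2
              (by omega) (by rw [List.length_set, hmB]; omega),
            pySetD_nonneg b x _ hx0 (by rw [hlen]; exact hx1)]
        rw [hupd]
        refine ih _ _ hprest ⟨by simp [hlen], ?_, ?_⟩
        · intro x0
          rw [rowlen_set _ _ _ (by simp) x0]
          exact hrowlen x0
        · intro i0 j0
          constructor
          · intro hmemn
            rw [PySem.Set.mem_add, PySem.Set.mem_add] at hmemn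
            rw [rdN_upd b _ _ _ hci' hcj' hcj1' i0 j0]
            split_ifs with c1 c2
            · omega
            · omega
            · rcases hmemn with (hm' | hE) | hE
              · exact (hcell i0 j0).1 hm'
              · obtain ⟨e1, e2⟩ := Prod.mk.inj hE
                exact absurd ⟨by omega, by omega⟩ c2
              · obtain ⟨e1, e2⟩ := Prod.mk.inj hE
                exact absurd ⟨by omega, by omega⟩ c1
          · intro hmemn
            rw [PySem.Set.mem_add, PySem.Set.mem_add, not_or, not_or] at hmemn
            rw [rdN_upd b _ _ _ hci' hcj' hcj1' i0 j0,
              if_neg (by rintro ⟨e1, e2⟩; exact hmemn.2 (by rw [e1, e2, hxcast, hy1cast])),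
              if_neg (by rintro ⟨e1, e2⟩; exact hmemn.1.2 (by rw [e1, e2, hxcast, hycast]))]
            exact (hcell i0 j0).2 hmemn.1.1
      · rw [if_pos (by rw [heq]; exact hz), if_pos (Or.inl hz)]
        exact (altGo_false _ _ _).symm

-- the disjoint case: neither program's overlap detection ever fires; both reduce to
-- reading the original board at each rung's left cell, in order
lemma go_eq_disj (orig : List (List Int)) (combi : List (Int × Int)) :
    ∀ (b : List (List Int)) (occ : PySem.Set (Int × Int)),
      (∀ p ∈ combi, PySem.Raise.InRange orig.length p.1 ∧
        PySem.Raise.InRange (PySem.List.pyGetD orig p.1 []).length p.2 ∧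
        PySem.Raise.InRange (PySem.List.pyGetD orig p.1 []).length (p.2 + 1)) →
      List.Pairwise (fun p q => cellL orig q ≠ cellL orig p ∧ cellL orig q ≠ cellR orig p) combi →
      b.length = orig.length →
      (∀ x : Int, (PySem.List.pyGetD b x ([] : List Int)).length
          = (PySem.List.pyGetD orig x ([] : List Int)).length) →
      (∀ q ∈ combi,
        rdN b (q.1 % (orig.length : Int)).toNat
          (q.2 % (((PySem.List.pyGetD orig q.1 ([] : List Int)).length : Nat) : Int)).toNat
        = rdN orig (q.1 % (orig.length : Int)).toNat
          (q.2 % (((PySem.List.pyGetD orig q.1 ([] : List Int)).length : Nat) : Int)).toNat) →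
      (∀ q ∈ combi, (q.1, q.2) ∉ occ) →
      checkGo b combi = checkAltGo orig combi occ true := by
  induction combi with
  | nil => intro b occ _ _ _ _ _ _; rfl
  | cons p rest ih =>
    obtain ⟨x, y⟩ := p
    intro b occ hpre hpw hlen hrowlen hreads hocc
    obtain ⟨hx', hy', hy1'⟩ := hpre (x, y) List.mem_cons_self
    have hx : PySem.Raise.InRange orig.length x := hx'
    have hy : PySem.Raise.InRange (PySem.List.pyGetD orig x ([] : List Int)).length y := hy'
    have hy1 : PySem.Raise.InRange (PySem.List.pyGetD orig x ([] : List Int)).length (y + 1) := hy1'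
    have hR : ∀ q ∈ rest, cellL orig q ≠ cellL orig (x, y) ∧ cellL orig q ≠ cellR orig (x, y) :=
      (List.pairwise_cons.mp hpw).1
    have hpw' := (List.pairwise_cons.mp hpw).2
    have hprest : ∀ p ∈ rest, PySem.Raise.InRange orig.length p.1 ∧
        PySem.Raise.InRange (PySem.List.pyGetD orig p.1 []).length p.2 ∧
        PySem.Raise.InRange (PySem.List.pyGetD orig p.1 []).length (p.2 + 1) :=
      fun q hq => hpre q (List.mem_cons_of_mem _ hq)
    have hn0 : 0 < orig.length := by obtain ⟨a, c⟩ := hx; omega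
    have hm0 : 0 < (PySem.List.pyGetD orig x ([] : List Int)).length := by
      obtain ⟨a, c⟩ := hy; omega
    -- canonical coordinates of this rung
    have hxb : PySem.Raise.InRange b.length x := by rw [hlen]; exact hx
    have hArow : PySem.List.pyGetD b x ([] : List Int)
        = b.getD (x % (orig.length : Int)).toNat [] := by
      rw [pyGetD_inRange _ _ _ hxb, hlen]
    have hBrow : PySem.List.pyGetD orig x ([] : List Int)
        = orig.getD (x % (orig.length : Int)).toNat [] := pyGetD_inRange _ _ _ hx
    have hmB : (b.getD (x % (orig.length : Int)).toNat ([] : List Int)).length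
        = (PySem.List.pyGetD orig x ([] : List Int)).length := by
      rw [← hArow]; exact hrowlen x
    have hAread : PySem.List.pyGetD (PySem.List.pyGetD b x ([] : List Int)) y 0
        = rdN b (x % (orig.length : Int)).toNat
            (y % (((PySem.List.pyGetD orig x ([] : List Int)).length : Nat) : Int)).toNat := by
      rw [hArow, pyGetD_inRange _ _ _ (by rw [hmB]; exact hy), hmB]
      rfl
    have hBread : PySem.List.pyGetD (PySem.List.pyGetD orig x ([] : List Int)) y 0
        = rdN orig (x % (orig.length : Int)).toNat
            (y % (((PySem.List.pyGetD orig x ([] : List Int)).length : Nat) : Int)).toNat := by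
      have hmO : (orig.getD (x % (orig.length : Int)).toNat ([] : List Int)).length
          = (PySem.List.pyGetD orig x ([] : List Int)).length :=
        (congrArg List.length hBrow).symm
      rw [hBrow, pyGetD_inRange _ _ _ (by rw [hmO]; exact hy), hmO]
      rfl
    have hread0 := hreads (x, y) List.mem_cons_self
    have hocc0 : ¬ PySem.Set.contains occ (x, y) := by
      simpa [PySem.Set.contains] using hocc (x, y) List.mem_cons_self
    simp only [checkGo, checkAltGo]
    rw [hAread, hBread]
    by_cases hz : rdN orig (x % (orig.length : Int)).toNat
        (y % (((PySem.List.pyGetD orig x ([] : List Int)).length : Nat) : Int)).toNat = 0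
    · rw [if_neg (by simp [hread0, hz]), if_neg (by
        rintro (hc | hc)
        · exact hc hz
        · exact hocc0 hc)]
      have hci' : (x % (orig.length : Int)).toNat < b.length := by
        rw [hlen]; exact canon_lt _ _ hx
      have hcj' : (y % (((PySem.List.pyGetD orig x ([] : List Int)).length : Nat) : Int)).toNat
          < (b.getD (x % (orig.length : Int)).toNat ([] : List Int)).length := by
        rw [hmB]; exact canon_lt _ _ hy
      have hcj1' : ((y + 1) % (((PySem.List.pyGetD orig x ([] : List Int)).length : Nat) : Int)).toNat
          < (b.getD (x % (orig.length : Int)).toNat ([] : List Int)).length := by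
        rw [hmB]; exact canon_lt _ _ hy1
      have hupd : PySem.List.pySetD b x
          (PySem.List.pySetD (PySem.List.pySetD (PySem.List.pyGetD b x []) y 1) (y + 1) 2)
          = b.set (x % (orig.length : Int)).toNat
            (((b.getD (x % (orig.length : Int)).toNat []).set
                (y % (((PySem.List.pyGetD orig x ([] : List Int)).length : Nat) : Int)).toNat 1).set
              ((y + 1) % (((PySem.List.pyGetD orig x ([] : List Int)).length : Nat) : Int)).toNat 2) := by
        rw [hArow,
          pySetD_inRange (b.getD (x % (orig.length : Int)).toNat ([] : List Int)) y 1
            (by rw [hmB]; exact hy), hmB,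
          pySetD_inRange ((b.getD (x % (orig.length : Int)).toNat ([] : List Int)).set
              (y % (((PySem.List.pyGetD orig x ([] : List Int)).length : Nat) : Int)).toNat 1) (y + 1) 2
            (by rw [List.length_set, hmB]; exact hy1),
          List.length_set, hmB, pySetD_inRange b x _ hxb, hlen]
      rw [hupd]
      refine ih _ _ hprest hpw' (by simp [hlen]) ?_ ?_ ?_
      · intro x0
        rw [rowlen_set _ _ _ (by simp) x0]
        exact hrowlen x0
      · -- left cells of the remaining rungs are untouched by this rung's writes
        intro q hq
        obtain ⟨hqx, hqy, _⟩ := hprest q hq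
        have hq0 : 0 < (PySem.List.pyGetD orig q.1 ([] : List Int)).length := by
          obtain ⟨a, c⟩ := hqy; omega
        have hrowq : ∀ (h : (q.1 % (orig.length : Int)).toNat = (x % (orig.length : Int)).toNat),
            PySem.List.pyGetD orig q.1 ([] : List Int) = PySem.List.pyGetD orig x ([] : List Int) := by
          intro h
          rw [pyGetD_inRange _ _ _ hqx, hBrow, h]
        rw [rdN_upd b _ _ _ hci' hcj' hcj1' _ _]
        have hcellL : cellL orig q = (PySem.Int.mod q.1 orig.length,
            PySem.Int.mod q.2 (PySem.List.pyGetD orig q.1 ([] : List Int)).length) := rfl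
        split_ifs with c1 c2
        · -- would coincide with this rung's RIGHT cell: contradicts disjointness
          exfalso
          obtain ⟨e1, e2⟩ := c1
          have hrq := hrowq e1
          refine (hR q hq).2 ?_
          have k1 : PySem.Int.mod q.1 ((orig.length : Nat) : Int)
              = PySem.Int.mod x ((orig.length : Nat) : Int) := by
            rw [PySem.Int.mod_eq_emod_of_pos (by exact_mod_cast hn0),
              PySem.Int.mod_eq_emod_of_pos (by exact_mod_cast hn0),
              ← canon_cast orig.length q.1 hn0, ← canon_cast orig.length x hn0, e1]
          have k2 : PySem.Int.mod q.2 (((PySem.List.pyGetD orig q.1 ([] : List Int)).length : Nat) : Int)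
              = PySem.Int.mod (y + 1) (((PySem.List.pyGetD orig x ([] : List Int)).length : Nat) : Int) := by
            rw [hrq, PySem.Int.mod_eq_emod_of_pos (by exact_mod_cast hm0),
              PySem.Int.mod_eq_emod_of_pos (by exact_mod_cast hm0),
              ← canon_cast _ q.2 hm0, ← canon_cast _ (y + 1) hm0]
            rw [hrq] at e2
            rw [e2]
          show cellL orig q = cellR orig (x, y)
          unfold cellL cellR
          exact Prod.ext (by simpa using k1) (by simpa [hrq] using k2)
        · -- would coincide with this rung's LEFT cell: contradicts disjointness
          exfalso
          obtain ⟨e1, e2⟩ := c2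
          have hrq := hrowq e1
          refine (hR q hq).1 ?_
          have k1 : PySem.Int.mod q.1 ((orig.length : Nat) : Int)
              = PySem.Int.mod x ((orig.length : Nat) : Int) := by
            rw [PySem.Int.mod_eq_emod_of_pos (by exact_mod_cast hn0),
              PySem.Int.mod_eq_emod_of_pos (by exact_mod_cast hn0),
              ← canon_cast orig.length q.1 hn0, ← canon_cast orig.length x hn0, e1]
          have k2 : PySem.Int.mod q.2 (((PySem.List.pyGetD orig q.1 ([] : List Int)).length : Nat) : Int)
              = PySem.Int.mod y (((PySem.List.pyGetD orig x ([] : List Int)).length : Nat) : Int) := by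
            rw [hrq, PySem.Int.mod_eq_emod_of_pos (by exact_mod_cast hm0),
              PySem.Int.mod_eq_emod_of_pos (by exact_mod_cast hm0),
              ← canon_cast _ q.2 hm0, ← canon_cast _ y hm0]
            rw [hrq] at e2
            rw [e2]
          show cellL orig q = cellL orig (x, y)
          unfold cellL
          exact Prod.ext (by simpa using k1) (by simpa [hrq] using k2)
        · exact hreads q (List.mem_cons_of_mem _ hq)
      · -- the literal left tuples of the remaining rungs stay outside the set
        intro q hq
        obtain ⟨hqx, hqy, _⟩ := hprest q hq
        rw [PySem.Set.mem_add, PySem.Set.mem_add, not_or, not_or]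
        refine ⟨⟨hocc q (List.mem_cons_of_mem _ hq), ?_⟩, ?_⟩
        · intro hE
          obtain ⟨e1, e2⟩ := Prod.mk.inj hE
          refine (hR q hq).1 ?_
          show cellL orig q = cellL orig (x, y)
          unfold cellL
          rw [e1, e2]
        · intro hE
          obtain ⟨e1, e2⟩ := Prod.mk.inj hE
          refine (hR q hq).2 ?_
          show cellL orig q = cellR orig (x, y)
          unfold cellL cellR
          rw [e1, e2]
    · rw [if_pos (by rw [hread0]; exact hz), if_pos (Or.inl hz)]
      exact (altGo_false _ _ _).symm

-- ===== VERDICT (by name: the statement is the Claim_ definition above) =====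
theorem check_spec : Claim_equal_check := by
  intro board combi _ hpre
  obtain ⟨hrange, hrest⟩ := hpre
  unfold Spec_check check check_alt
  rcases hrest with hlen | hnn | hdisj
  · match combi, hlen with
    | [], _ => rfl
    | [p], _ => exact single_eq board p
    | p :: q :: r, hlen => simp [List.length] at hlen
  · refine go_eq board combi board PySem.Set.empty ?_
      ⟨rfl, fun _ => rfl, fun i j =>
        ⟨fun h => absurd h (by simp [PySem.Set.empty]), fun _ => rfl⟩⟩
    intro p hp
    obtain ⟨h1, h2, h3⟩ := hrange p hp
    obtain ⟨hn1, hn2⟩ := hnn p hp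
    exact ⟨hn1, h1.2, hn2, h3.2⟩
  · exact go_eq_disj board combi board PySem.Set.empty hrange hdisj rfl (fun _ => rfl)
      (fun _ _ => rfl) (fun q _ => by simp [PySem.Set.empty])
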